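-- pv_equiv track=rewrite | github.com/tafita81/Trader | backend/footprint_delta_liquidity.py | detect_liquidity
-- ===== SOURCE A (Python) =====
-- def detect_liquidity(highs, lows):
--     # regiões onde preço testou várias vezes
--     liquidity_zones = []
--
--     for i in range(2, len(highs)):
--         if highs[i] == highs[i-1] == highs[i-2]:
--             liquidity_zones.append(("resistance", highs[i]))
--
--     for i in range(2, len(lows)):
--         if lows[i] == lows[i-1] == lows[i-2]:
--             liquidity_zones.append(("support", lows[i]))
--
--     return liquidity_zones
-- ===== SOURCE B (Python) =====
-- def detect_liquidity(highs, lows):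
--     # Run-length decomposition: each maximal run of n >= 3 equal values
--     # contributes n-2 zone tuples (one per sliding 3-window inside the run).
--     def rle(xs):
--         runs = []
--         if not xs:
--             return runs
--         cur, cnt = xs[0], 1
--         for x in xs[1:]:
--             if x == cur:
--                 cnt += 1
--             else:
--                 runs.append((cur, cnt))
--                 cur, cnt = x, 1
--         runs.append((cur, cnt))
--         return runs
--
--     zones = []
--     for kind, xs in (("resistance", highs), ("support", lows)):
--         for value, n in rle(xs):
--             if n >= 3:
--                 zones.extend([(kind, value)] * (n - 2))
--     return zones
-- ===== Notes on version B (the rewrite author's own statement) =====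
-- stated objective: alternative
-- what changed: Replaces the two fixed 3-window index scans with a run-length decomposition: each list is grouped into maximal runs of equal values and a run of length n >= 3 emits n-2 zone tuples.
import Mathlib
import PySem

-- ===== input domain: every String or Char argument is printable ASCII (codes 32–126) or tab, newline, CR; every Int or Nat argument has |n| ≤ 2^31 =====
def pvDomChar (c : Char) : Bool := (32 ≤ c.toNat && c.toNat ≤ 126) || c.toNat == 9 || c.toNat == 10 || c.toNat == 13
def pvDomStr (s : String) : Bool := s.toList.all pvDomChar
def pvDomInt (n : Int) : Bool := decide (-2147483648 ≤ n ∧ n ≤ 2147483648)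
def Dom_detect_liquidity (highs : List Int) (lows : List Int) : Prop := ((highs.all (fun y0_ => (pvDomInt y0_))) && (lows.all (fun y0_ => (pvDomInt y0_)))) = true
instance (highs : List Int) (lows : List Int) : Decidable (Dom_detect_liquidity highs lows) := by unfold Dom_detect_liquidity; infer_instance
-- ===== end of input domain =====

-- B replaces A's two fixed 3-window index scans by a run-length decomposition
-- (maximal equal runs; a run of length n ≥ 3 emits n-2 zone tuples): alternative, same cost.


-- ===== PORT A =====
-- 'for i in range(2, len(xs)): if xs[i] == xs[i-1] == xs[i-2]: acc.append((tag, xs[i]))'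
def pvScanA (tag : String) (xs : List Int) (acc : List (String × Int)) : List (String × Int) :=
  (PySem.List.pyRange 2 (xs.length : Int) 1).foldl
    (fun acc i =>
      if PySem.List.pyGetD xs i 0 == PySem.List.pyGetD xs (i-1) 0
          && PySem.List.pyGetD xs (i-1) 0 == PySem.List.pyGetD xs (i-2) 0
      then acc ++ [(tag, PySem.List.pyGetD xs i 0)] else acc) acc

def detect_liquidity (highs : List Int) (lows : List Int) : List (String × Int) :=
  pvScanA "support" lows (pvScanA "resistance" highs [])

-- ===== PORT B =====
-- run-length encoding of xs (the 'rle' helper of Source B: a fold carrying (runs, cur, cnt))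
def pvRleStep (s : List (Int × Nat) × Int × Nat) (x : Int) : List (Int × Nat) × Int × Nat :=
  if x = s.2.1 then (s.1, s.2.1, s.2.2 + 1) else (s.1 ++ [(s.2.1, s.2.2)], x, 1)

def pvRle (xs : List Int) : List (Int × Nat) :=
  match xs with
  | [] => []
  | x :: rest =>
    let s := rest.foldl pvRleStep ([], x, 1)
    s.1 ++ [(s.2.1, s.2.2)]

-- 'for value, n in rle(xs): if n >= 3: zones.extend([(kind, value)] * (n - 2))'
def pvExpand (tag : String) (runs : List (Int × Nat)) : List (String × Int) :=
  runs.flatMap (fun r => if 3 ≤ r.2 then List.replicate (r.2 - 2) (tag, r.1) else [])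

def detect_liquidity_alt (highs : List Int) (lows : List Int) : List (String × Int) :=
  pvExpand "resistance" (pvRle highs) ++ pvExpand "support" (pvRle lows)

-- ===== PRECONDITION & SPEC =====
def Spec_detect_liquidity (highs : List Int) (lows : List Int) (out : List (String × Int)) : Prop := out = detect_liquidity_alt highs lows
instance (highs : List Int) (lows : List Int) (out : List (String × Int)) : Decidable (Spec_detect_liquidity highs lows out) := by unfold Spec_detect_liquidity; infer_instance

-- ===== CLAIM (what is proved, stated in full; the proofs are below) =====
def Claim_equal_detect_liquidity : Prop := ∀ (highs : List Int) (lows : List Int), Dom_detect_liquidity highs lows → Spec_detect_liquidity highs lows (detect_liquidity highs lows)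

-- ===== LEMMAS AND PROOFS =====

-- the common value stream: values at the centre-right of every equal 3-window
def pvTriple : List Int → List Int
  | a :: b :: c :: t => (if c = b ∧ b = a then [c] else []) ++ pvTriple (b :: c :: t)
  | _ => []

-- the same stream with the two previously seen values as explicit state
def pvTriple2 (p q : Int) : List Int → List Int
  | [] => []
  | c :: t => (if c = q ∧ q = p then [c] else []) ++ pvTriple2 q c t

-- recursive form of the rle fold
def pvRleAux (v : Int) (n : Nat) : List Int → List (Int × Nat)
  | [] => [(v, n)]
  | b :: t => if b = v then pvRleAux v (n+1) t else (v, n) :: pvRleAux b 1 t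

def pvExpandVals (runs : List (Int × Nat)) : List Int :=
  runs.flatMap (fun r => if 3 ≤ r.2 then List.replicate (r.2 - 2) r.1 else [])

theorem pvRle_foldl_eq (t : List Int) : ∀ (runs : List (Int × Nat)) (v : Int) (n : Nat),
    (t.foldl pvRleStep (runs, v, n)).1 ++ [((t.foldl pvRleStep (runs, v, n)).2.1, (t.foldl pvRleStep (runs, v, n)).2.2)]
      = runs ++ pvRleAux v n t := by
  induction t with
  | nil => intro runs v n; simp [pvRleAux]
  | cons b t ih =>
    intro runs v n
    by_cases h : b = v
    · simp [List.foldl_cons, pvRleStep, h, pvRleAux, ih]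
    · simp [List.foldl_cons, pvRleStep, h, pvRleAux, ih]

theorem pvExpand_eq_map (tag : String) (runs : List (Int × Nat)) :
    pvExpand tag runs = (pvExpandVals runs).map (fun v => (tag, v)) := by
  induction runs with
  | nil => simp [pvExpand, pvExpandVals]
  | cons r rs ih =>
    simp only [pvExpand, pvExpandVals, List.flatMap_cons, List.map_append] at *
    rw [ih]
    by_cases h : 3 ≤ r.2 <;> simp [h, List.map_replicate]

theorem pvTriple_eq_triple2 (t : List Int) : ∀ a b, pvTriple (a :: b :: t) = pvTriple2 a b t := by
  induction t with
  | nil => intro a b; simp [pvTriple, pvTriple2]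
  | cons c t ih => intro a b; simp [pvTriple, pvTriple2, ih]

theorem pvRleAux_expand (t : List Int) :
    (∀ v n, 2 ≤ n → pvExpandVals (pvRleAux v n t) = List.replicate (n - 2) v ++ pvTriple2 v v t) ∧
    (∀ v w, w ≠ v → pvExpandVals (pvRleAux v 1 t) = pvTriple2 w v t) := by
  induction t with
  | nil =>
    constructor
    · intro v n hn
      simp only [pvRleAux, pvExpandVals, List.flatMap_cons, List.flatMap_nil, pvTriple2,
        List.append_nil]
      by_cases h3 : 3 ≤ n
      · simp [h3]
      · have : n - 2 = 0 := by omega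
        simp [h3, this]
    · intro v w _
      simp [pvRleAux, pvExpandVals, pvTriple2]
  | cons c t ih =>
    have repl_eq : ∀ (n : Nat) (v : Int), 2 ≤ n →
        (if 3 ≤ n then List.replicate (n - 2) v else []) = List.replicate (n - 2) v := by
      intro n v hn
      by_cases h3 : 3 ≤ n
      · simp [h3]
      · have : n - 2 = 0 := by omega
        simp [h3, this]
    constructor
    · intro v n hn
      simp only [pvRleAux]
      by_cases h : c = v
      · subst h
        rw [if_pos rfl, ih.1 c (n+1) (by omega),
          show n + 1 - 2 = (n - 2) + 1 from by omega, List.replicate_succ']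
        simp [pvTriple2]
      · rw [if_neg h]
        simp only [pvExpandVals, List.flatMap_cons]
        rw [repl_eq n v hn,
          show (List.flatMap (fun r => if 3 ≤ r.2 then List.replicate (r.2 - 2) r.1 else [])
              (pvRleAux c 1 t)) = pvExpandVals (pvRleAux c 1 t) from rfl,
          ih.2 c v (fun e => h e.symm)]
        simp [pvTriple2, h]
    · intro v w hw
      simp only [pvRleAux]
      by_cases h : c = v
      · subst h
        rw [if_pos rfl, ih.1 c 2 (by omega)]
        simp [pvTriple2, Ne.symm hw]
      · rw [if_neg h]
        simp only [pvExpandVals, List.flatMap_cons]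
        rw [show (List.flatMap (fun r => if 3 ≤ r.2 then List.replicate (r.2 - 2) r.1 else [])
              (pvRleAux c 1 t)) = pvExpandVals (pvRleAux c 1 t) from rfl,
          ih.2 c v (fun e => h e.symm)]
        simp [pvTriple2, h]

theorem pvExpandVals_rle (xs : List Int) : pvExpandVals (pvRle xs) = pvTriple xs := by
  match xs with
  | [] => simp [pvRle, pvExpandVals, pvTriple]
  | [a] => simp [pvRle, pvExpandVals, pvTriple]
  | a :: b :: t =>
    rw [pvTriple_eq_triple2]
    show pvExpandVals (let s := (b :: t).foldl pvRleStep ([], a, 1); s.1 ++ [(s.2.1, s.2.2)]) = _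
    rw [pvRle_foldl_eq (b :: t) [] a 1]
    simp only [List.nil_append, pvRleAux]
    by_cases h : b = a
    · subst h
      rw [if_pos rfl, (pvRleAux_expand t).1 b 2 (by omega)]
      simp
    · rw [if_neg h]
      simp only [pvExpandVals, List.flatMap_cons]
      rw [show (List.flatMap (fun r => if 3 ≤ r.2 then List.replicate (r.2 - 2) r.1 else [])
            (pvRleAux b 1 t)) = pvExpandVals (pvRleAux b 1 t) from rfl,
        (pvRleAux_expand t).2 b a (fun e => h e.symm)]
      simp

-- the window scan written over natural indices
theorem pv_natWin (xs : List Int) :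
    ((List.range (xs.length - 2)).filter
        (fun k => xs.getD (k+2) 0 == xs.getD (k+1) 0 && xs.getD (k+1) 0 == xs.getD k 0)).map
      (fun k => xs.getD (k+2) 0) = pvTriple xs := by
  induction xs using pvTriple.induct with
  | case1 a b c t ih =>
    have hl : (a :: b :: c :: t).length - 2 = t.length + 1 := by simp
    rw [hl, List.range_succ_eq_map, List.filter_cons, List.filter_map]
    have h1 : List.filter
        ((fun k => (a::b::c::t).getD (k+2) 0 == (a::b::c::t).getD (k+1) 0
            && (a::b::c::t).getD (k+1) 0 == (a::b::c::t).getD k 0) ∘ Nat.succ)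
        (List.range t.length)
        = List.filter
        (fun k => (b::c::t).getD (k+2) 0 == (b::c::t).getD (k+1) 0
            && (b::c::t).getD (k+1) 0 == (b::c::t).getD k 0) (List.range t.length) := by
      apply List.filter_congr
      intro k _
      simp [Function.comp, Nat.succ_eq_add_one,
        show ∀ m : Nat, m+1+2 = (m+2)+1 from fun m => by omega]
    have h2 : ∀ l : List Nat,
        l.map ((fun k => (a::b::c::t).getD (k+2) 0) ∘ Nat.succ)
        = l.map (fun k => (b::c::t).getD (k+2) 0) := by
      intro l
      apply List.map_congr_left
      intro k _
      simp [Function.comp, Nat.succ_eq_add_one,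
        show ∀ m : Nat, m+1+2 = (m+2)+1 from fun m => by omega]
    rw [show (b :: c :: t).length - 2 = t.length from by simp] at ih
    by_cases hcb : c = b ∧ b = a
    · have : ((a::b::c::t).getD (0+2) 0 == (a::b::c::t).getD (0+1) 0
          && (a::b::c::t).getD (0+1) 0 == (a::b::c::t).getD 0 0) = true := by
        simp [hcb.1, hcb.2]
      rw [if_pos this, List.map_cons, List.map_map, h1, h2, ih]
      simp [pvTriple, hcb.1, hcb.2]
    · have : ((a::b::c::t).getD (0+2) 0 == (a::b::c::t).getD (0+1) 0
          && (a::b::c::t).getD (0+1) 0 == (a::b::c::t).getD 0 0) = false := by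
        simp only [List.getD_cons_succ, List.getD_cons_zero]
        by_cases h1 : c = b <;> by_cases h2 : b = a <;> simp_all
      rw [if_neg (by simp only [this]; exact Bool.false_ne_true), List.map_map, h1, h2, ih]
      simp only [pvTriple]
      rw [if_neg hcb]
      simp
  | case2 xs hne =>
    match xs, hne with
    | [], _ => simp [pvTriple]
    | [a], _ => simp [pvTriple]
    | [a, b], _ => simp [pvTriple]
    | a :: b :: c :: t, hne => exact absurd rfl (hne a b c t)

theorem pvScanA_eq (tag : String) (xs : List Int) (acc : List (String × Int)) :
    pvScanA tag xs acc = acc ++ (pvTriple xs).map (fun v => (tag, v)) := by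
  unfold pvScanA
  rw [PySem.List.pyRange_one]
  rw [show (((xs.length : Int)) - 2).toNat = xs.length - 2 from by omega]
  rw [List.foldl_map]
  rw [PySem.List.foldl_append_if
    (fun k : Nat => PySem.List.pyGetD xs (2 + (k : Int)) 0 == PySem.List.pyGetD xs ((2 + (k : Int))-1) 0
        && PySem.List.pyGetD xs ((2 + (k : Int))-1) 0 == PySem.List.pyGetD xs ((2 + (k : Int))-2) 0)
    (fun k : Nat => (tag, PySem.List.pyGetD xs (2 + (k : Int)) 0))]
  have hidx : ∀ k : Nat,
      PySem.List.pyGetD xs (2 + (k : Int)) 0 = xs.getD (k+2) 0 ∧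
      PySem.List.pyGetD xs ((2 + (k : Int))-1) 0 = xs.getD (k+1) 0 ∧
      PySem.List.pyGetD xs ((2 + (k : Int))-2) 0 = xs.getD k 0 := by
    intro k
    refine ⟨?_, ?_, ?_⟩
    · rw [show (2 + (k : Int)) = ((k+2 : Nat) : Int) from by push_cast; ring, PySem.List.pyGetD_natCast]
    · rw [show (2 + (k : Int)) - 1 = ((k+1 : Nat) : Int) from by push_cast; ring, PySem.List.pyGetD_natCast]
    · rw [show (2 + (k : Int)) - 2 = ((k : Nat) : Int) from by ring, PySem.List.pyGetD_natCast]
  have hfil : List.filter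
      (fun k : Nat => PySem.List.pyGetD xs (2 + (k : Int)) 0 == PySem.List.pyGetD xs ((2 + (k : Int))-1) 0
        && PySem.List.pyGetD xs ((2 + (k : Int))-1) 0 == PySem.List.pyGetD xs ((2 + (k : Int))-2) 0)
      (List.range (xs.length - 2))
      = List.filter (fun k => xs.getD (k+2) 0 == xs.getD (k+1) 0 && xs.getD (k+1) 0 == xs.getD k 0)
        (List.range (xs.length - 2)) := by
    apply List.filter_congr
    intro k _
    rw [(hidx k).1, (hidx k).2.1, (hidx k).2.2]
  rw [hfil]
  have hmap : ∀ l : List Nat,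
      l.map (fun k : Nat => (tag, PySem.List.pyGetD xs (2 + (k : Int)) 0))
      = (l.map (fun k => xs.getD (k+2) 0)).map (fun v => (tag, v)) := by
    intro l
    rw [List.map_map]
    apply List.map_congr_left
    intro k _
    simp [Function.comp, (hidx k).1]
  rw [hmap, pv_natWin]

-- ===== VERDICT (by name: the statement is the Claim_ definition above) =====
theorem detect_liquidity_spec : Claim_equal_detect_liquidity := by
  intro highs lows _
  unfold Spec_detect_liquidity detect_liquidity detect_liquidity_alt
  rw [pvScanA_eq, pvScanA_eq, pvExpand_eq_map, pvExpand_eq_map, pvExpandVals_rle, pvExpandVals_rle]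
  simp
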